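-- pv_equiv track=rewrite | github.com/benwing2/RuNounChanges | infltags.py | split_multipart_tag_set
-- ===== SOURCE A (Python) =====
-- def split_multipart_tag_set(ts):
--   for i, tag in enumerate(ts):
--     if "//" in tag:
--       single_tags = tag.split("//")
--       pre_tags = ts[0:i]
--       post_tags = ts[i+1:]
--       tag_sets = []
--       for single_tag in single_tags:
--         tag_sets.extend(split_multipart_tag_set(
--           pre_tags + [single_tag] + post_tags))
--       return tag_sets
--   return [ts]
-- ===== SOURCE B (Python) =====
-- def split_multipart_tag_set(ts):
--   # Iterative cartesian product built back-to-front: no recursion, no rescans.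
--   result = [[]]
--   for tag in reversed(ts):
--     parts = tag.split("//")
--     result = [[p] + combo for p in parts for combo in result]
--   return result
-- ===== Notes on version B (the rewrite author's own statement) =====
-- stated objective: alternative
-- what changed: Replaces A's find-first-'//'-and-recurse-on-rebuilt-lists scheme with a single right-to-left fold that builds the cartesian product of the per-tag '//'-splits directly.
import Mathlib
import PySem

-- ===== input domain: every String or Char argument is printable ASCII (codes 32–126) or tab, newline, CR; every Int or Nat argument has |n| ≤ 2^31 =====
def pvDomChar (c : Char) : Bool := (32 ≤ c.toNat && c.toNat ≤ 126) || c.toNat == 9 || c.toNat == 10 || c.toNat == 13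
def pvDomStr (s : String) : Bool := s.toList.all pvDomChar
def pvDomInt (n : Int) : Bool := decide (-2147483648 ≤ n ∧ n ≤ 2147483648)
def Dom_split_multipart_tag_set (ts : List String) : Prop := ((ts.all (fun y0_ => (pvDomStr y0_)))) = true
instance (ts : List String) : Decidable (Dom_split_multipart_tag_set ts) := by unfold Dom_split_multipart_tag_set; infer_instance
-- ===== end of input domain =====

-- B replaces A's find-first-"//"-and-recurse scheme by a single right-to-left fold
-- building the cartesian product of the per-tag "//"-splits (objective: alternative).

-- ===== PORT A =====

-- tag.split("//")  (separator nonempty, exact Python semantics via PySem.Chars.splitOn)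
def pySplitDD (t : String) : List String :=
  (PySem.Chars.splitOn t.toList "//".toList).map String.ofList

-- number of tags containing "//": the termination measure of A's recursion
def ddCount (ts : List String) : Nat :=
  ts.countP (fun t => PySem.Str.isIn "//" t)

-- The block up to ddCount_lt establishes the fact A's termination rests on:
-- the pieces of tag.split("//") contain no "//".

-- GoodCur sep cur l: no nonempty prefix of cur, reversed, starts an occurrence of sep in cur.reverse ++ l
def GoodCur (sep cur l : List Char) : Prop :=
  ∀ p, p ≠ [] → p <+: cur → ¬ sep <+: (p.reverse ++ l)

-- splitOn.go unfolding equations (definitional)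
theorem go_nil (sep : List Char) (fuel : Nat) (cur : List Char) (acc : List (List Char)) :
    PySem.Chars.splitOn.go sep (fuel+1) [] cur acc = (cur.reverse :: acc).reverse := rfl

theorem go_cons (sep : List Char) (fuel : Nat) (c : Char) (rest cur : List Char) (acc : List (List Char)) :
    PySem.Chars.splitOn.go sep (fuel+1) (c :: rest) cur acc =
      if sep.isPrefixOf (c :: rest) then
        PySem.Chars.splitOn.go sep fuel (List.drop sep.length (c :: rest)) [] (cur.reverse :: acc)
      else PySem.Chars.splitOn.go sep fuel rest (c :: cur) acc := rfl

theorem goodCur_nil (sep l : List Char) : GoodCur sep [] l := by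
  intro p hp hpre
  cases List.prefix_nil.mp hpre
  exact absurd rfl hp

theorem goodCur_emit {sep cur l : List Char} (hsep : sep ≠ []) (hg : GoodCur sep cur l) :
    ¬ sep <:+: cur.reverse := by
  intro hinf
  obtain ⟨t, hpt, hts⟩ := List.infix_iff_prefix_suffix.mp hinf
  have ht : t ≠ [] := by
    intro h; subst h; exact hsep (List.prefix_nil.mp hpt)
  obtain ⟨u, hu⟩ := hts
  have hcur : cur = t.reverse ++ u.reverse := by
    have := congrArg List.reverse hu
    simpa using this.symm
  have hpc : t.reverse <+: cur := ⟨u.reverse, hcur.symm⟩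
  have := hg t.reverse (by simpa using ht) hpc
  rw [List.reverse_reverse] at this
  exact this (hpt.trans (List.prefix_append _ _))

theorem goodCur_step {sep cur l : List Char} {c : Char}
    (hnp : ¬ sep <+: (c :: l)) (hg : GoodCur sep cur (c :: l)) :
    GoodCur sep (c :: cur) l := by
  intro p hp hpre
  cases p with
  | nil => exact absurd rfl hp
  | cons x q =>
    obtain ⟨rfl, hq⟩ := List.cons_prefix_cons.mp hpre
    intro habs
    by_cases hq0 : q = []
    · exact hnp (by simpa [hq0] using habs)
    · exact hg q hq0 hq (by simpa using habs)

theorem go_no_infix (sep : List Char) (hsep : sep ≠ []) :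
    ∀ fuel l cur acc, l.length < fuel →
      (∀ q ∈ acc, ¬ sep <:+: q) → GoodCur sep cur l →
      ∀ p ∈ PySem.Chars.splitOn.go sep fuel l cur acc, ¬ sep <:+: p := by
  intro fuel
  induction fuel with
  | zero => intro l cur acc h; omega
  | succ fuel ih =>
    intro l cur acc hlen hacc hg p hp
    cases l with
    | nil =>
      rw [go_nil] at hp
      simp at hp
      rcases hp with h | h
      · exact hacc p h
      · subst h; exact goodCur_emit hsep hg
    | cons c rest =>
      rw [go_cons] at hp
      by_cases hpre : sep.isPrefixOf (c :: rest) = true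
      · rw [if_pos hpre] at hp
        have hsl : 1 ≤ sep.length := by
          cases sep with
          | nil => exact absurd rfl hsep
          | cons _ _ => simp
        refine ih _ _ _ (by simp at hlen ⊢; omega) ?_ (goodCur_nil _ _) p hp
        intro q hq
        simp at hq
        rcases hq with h | h
        · subst h; exact goodCur_emit hsep hg
        · exact hacc q h
      · rw [if_neg hpre] at hp
        have hnp : ¬ sep <+: (c :: rest) := fun h => hpre (List.isPrefixOf_iff_prefix.mpr h)
        exact ih _ _ _ (by simp at hlen ⊢; omega) hacc (goodCur_step hnp hg) p hp

theorem splitOn_parts {s sep p : List Char} (hsep : sep ≠ [])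
    (hp : p ∈ PySem.Chars.splitOn s sep) : ¬ sep <:+: p := by
  unfold PySem.Chars.splitOn at hp
  exact go_no_infix sep hsep _ _ _ _ (by omega) (by simp) (goodCur_nil _ _) p hp

theorem pySplitDD_not_contains {t s : String} (hs : s ∈ pySplitDD t) :
    PySem.Str.isIn "//" s = false := by
  unfold pySplitDD at hs
  obtain ⟨cs, hcs, rfl⟩ := List.mem_map.mp hs
  have h := splitOn_parts (s := t.toList) (sep := "//".toList) (by decide) hcs
  rw [PySem.Str.isIn_eq, PySem.Chars.isIn_eq_false_iff]
  simpa using h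

theorem ddCount_lt {ts : List String} {i : Nat} (h : i < ts.length)
    (htag : PySem.Str.isIn "//" ts[i] = true) {s : String}
    (hs : PySem.Str.isIn "//" s = false) :
    ddCount (PySem.List.slice ts (some 0) (some (i : Int)) ++ [s] ++
             PySem.List.slice ts (some ((i : Int) + 1)) none) < ddCount ts := by
  have h1 : PySem.List.slice ts (some 0) (some (i : Int)) = ts.take i := by
    rw [PySem.List.slice_zero_start, PySem.List.slice_to_natCast]
  have h2 : PySem.List.slice ts (some ((i : Int) + 1)) none = ts.drop (i + 1) := by
    have he : ((i : Int) + 1) = ((i + 1 : Nat) : Int) := by push_cast; ring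
    rw [he, PySem.List.slice_from_natCast]
  rw [h1, h2]
  unfold ddCount
  conv_rhs => rw [← List.take_append_drop i ts, List.countP_append,
    ← List.getElem_cons_drop h, List.countP_cons]
  rw [List.countP_append, List.countP_append]
  simp only [htag, if_true, List.countP_cons, List.countP_nil, hs, Bool.false_eq_true, if_false]
  omega

-- the 'for i, tag in enumerate(ts)' loop, scanning from index i
def splitA_go (ts : List String) (i : Nat) : List (List String) :=
  if h : i < ts.length then
    let tag := ts[i]
    if htag : PySem.Str.isIn "//" tag = true then
      let single_tags := pySplitDD tag
      let pre_tags := PySem.List.slice ts (some 0) (some (i : Int))        -- ts[0:i]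
      let post_tags := PySem.List.slice ts (some ((i : Int) + 1)) none     -- ts[i+1:]
      -- tag_sets = []; for single_tag in single_tags: tag_sets.extend(recurse)
      single_tags.attach.foldl
        (fun tag_sets st =>
          tag_sets ++ splitA_go (pre_tags ++ [st.1] ++ post_tags) 0) []
    else
      splitA_go ts (i + 1)
  else
    [ts]
termination_by (ddCount ts, ts.length - i)
decreasing_by
  · exact Prod.Lex.left _ _ (ddCount_lt h htag (pySplitDD_not_contains st.2))
  · exact Prod.Lex.right _ (by omega)

def split_multipart_tag_set (ts : List String) : List (List String) :=
  splitA_go ts 0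

-- ===== PORT B =====
def split_multipart_tag_set_alt (ts : List String) : List (List String) :=
  ts.reverse.foldl
    (fun result tag =>
      (pySplitDD tag).flatMap (fun p => result.map (fun combo => [p] ++ combo)))
    [[]]

-- ===== PRECONDITION & SPEC =====
def Spec_split_multipart_tag_set (ts : List String) (out : List (List String)) : Prop := out = split_multipart_tag_set_alt ts
instance (ts : List String) (out : List (List String)) : Decidable (Spec_split_multipart_tag_set ts out) := by unfold Spec_split_multipart_tag_set; infer_instance

-- ===== CLAIM (what is proved, stated in full; the proofs are below) =====
def Claim_equal_split_multipart_tag_set : Prop := ∀ (ts : List String), Dom_split_multipart_tag_set ts → Spec_split_multipart_tag_set ts (split_multipart_tag_set ts)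

-- ===== LEMMAS AND PROOFS =====

theorem go_of_no_occurrence (sep : List Char) (_hsep : sep ≠ []) :
    ∀ fuel l cur acc, l.length < fuel → ¬ sep <:+: (cur.reverse ++ l) →
      PySem.Chars.splitOn.go sep fuel l cur acc = ((cur.reverse ++ l) :: acc).reverse := by
  intro fuel
  induction fuel with
  | zero => intro l cur acc h; omega
  | succ fuel ih =>
    intro l cur acc hlen hno
    cases l with
    | nil => rw [go_nil]; simp
    | cons c rest =>
      rw [go_cons]
      have hpre : sep.isPrefixOf (c :: rest) = false := by
        rw [Bool.eq_false_iff]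
        intro h
        exact hno ((List.isPrefixOf_iff_prefix.mp h).isInfix.trans
          (List.infix_iff_prefix_suffix.mpr ⟨c :: rest, List.prefix_rfl, List.suffix_append _ _⟩))
      rw [if_neg (by simp [hpre])]
      rw [ih rest (c :: cur) acc (by simp at hlen ⊢; omega) (by simpa using hno)]
      simp

theorem pySplitDD_of_not_contains {t : String} (h : PySem.Str.isIn "//" t = false) :
    pySplitDD t = [t] := by
  unfold pySplitDD PySem.Chars.splitOn
  rw [go_of_no_occurrence "//".toList (by decide) _ _ _ _ (by omega)
    (by rw [PySem.Str.isIn_eq, PySem.Chars.isIn_eq_false_iff] at h; simpa using h)]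
  simp

-- B's fold as a structural product
def prodB : List (List String) → List (List String)
  | [] => [[]]
  | ps :: rest => ps.flatMap (fun p => (prodB rest).map (p :: ·))

theorem foldr_eq_prodB : ∀ ts : List String,
    List.foldr (fun tag result => (pySplitDD tag).flatMap
      (fun p => result.map (fun combo => p :: combo))) [[]] ts
      = prodB (ts.map pySplitDD) := by
  intro ts
  induction ts with
  | nil => simp [prodB]
  | cons t ts ih => simp only [List.foldr_cons, List.map_cons, prodB, ih]

theorem alt_eq_prodB (ts : List String) :
    split_multipart_tag_set_alt ts = prodB (ts.map pySplitDD) := by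
  unfold split_multipart_tag_set_alt
  rw [List.foldl_reverse]
  have h := foldr_eq_prodB ts
  simp only [List.singleton_append] at h ⊢
  exact h

theorem prodB_singletons (pre : List String) (L : List (List String)) :
    prodB (pre.map (fun t => [t]) ++ L) = (prodB L).map (pre ++ ·) := by
  induction pre with
  | nil => simp
  | cons t pre ih => simp [prodB, ih, List.map_map, Function.comp]

-- the scan from index i, with all tags before i free of "//", computes the product of the rest
theorem go_eq : ∀ N ts i, ddCount ts * (ts.length + 1) + (ts.length - i) ≤ N →
    (∀ t ∈ ts.take i, PySem.Str.isIn "//" t = false) →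
    splitA_go ts i = (prodB ((ts.drop i).map pySplitDD)).map (ts.take i ++ ·) := by
  intro N
  induction N with
  | zero =>
    intro ts i hN _
    have hi : ts.length ≤ i := by omega
    rw [splitA_go]
    rw [dif_neg (by omega)]
    rw [List.drop_of_length_le hi, List.take_of_length_le hi]
    simp [prodB]
  | succ N ihN =>
    intro ts i hN hclean
    rw [splitA_go]
    by_cases h : i < ts.length
    · rw [dif_pos h]
      have hdrop : ts.drop i = ts[i] :: ts.drop (i + 1) := (List.getElem_cons_drop h).symm
      by_cases htag : PySem.Str.isIn "//" ts[i] = true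
      · rw [dif_pos htag]
        -- contains case
        rw [List.foldl_attach
          (f := fun tag_sets s => tag_sets ++ splitA_go
            (PySem.List.slice ts (some 0) (some (i : Int)) ++ [s] ++
             PySem.List.slice ts (some ((i : Int) + 1)) none) 0)]
        rw [PySem.List.foldl_append_eq_flatMap]
        rw [List.nil_append]
        have h1 : PySem.List.slice ts (some 0) (some (i : Int)) = ts.take i := by
          rw [PySem.List.slice_zero_start, PySem.List.slice_to_natCast]
        have h2 : PySem.List.slice ts (some ((i : Int) + 1)) none = ts.drop (i + 1) := by
          have he : ((i : Int) + 1) = ((i + 1 : Nat) : Int) := by push_cast; ring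
          rw [he, PySem.List.slice_from_natCast]
        have hstep : ∀ s ∈ pySplitDD ts[i],
            splitA_go (PySem.List.slice ts (some 0) (some (i : Int)) ++ [s] ++
              PySem.List.slice ts (some ((i : Int) + 1)) none) 0
            = ((prodB ((ts.drop (i+1)).map pySplitDD)).map (s :: ·)).map (ts.take i ++ ·) := by
          intro s hs
          have hsc := pySplitDD_not_contains hs
          have hlen' : (ts.take i ++ [s] ++ ts.drop (i+1)).length = ts.length := by
            simp; omega
          have hcnt : ddCount (ts.take i ++ [s] ++ ts.drop (i+1)) < ddCount ts := by
            have := ddCount_lt h htag hsc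
            rwa [h1, h2] at this
          rw [h1, h2]
          have e1 : ddCount (ts.take i ++ [s] ++ ts.drop (i+1)) + 1 ≤ ddCount ts := hcnt
          have e2 := Nat.mul_le_mul_right (ts.length + 1) e1
          rw [Nat.add_mul, Nat.one_mul] at e2
          rw [ihN (ts.take i ++ [s] ++ ts.drop (i+1)) 0
            (by rw [hlen']; omega) (by simp)]
          rw [List.take_zero, List.drop_zero]
          have hmap : (ts.take i ++ [s] ++ ts.drop (i+1)).map pySplitDD
              = (ts.take i).map (fun t => [t]) ++ ([s] :: (ts.drop (i+1)).map pySplitDD) := by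
            simp only [List.map_append, List.map_cons, List.map_nil]
            rw [List.map_congr_left (fun t ht => pySplitDD_of_not_contains (hclean t ht)),
                pySplitDD_of_not_contains hsc]
            simp
          rw [hmap, prodB_singletons]
          simp [prodB]
        rw [List.flatMap_congr hstep]  -- may need replacement if lemma absent
        rw [hdrop]
        simp only [List.map_cons, prodB, List.map_flatMap, List.map_map]
      · rw [dif_neg htag]
        -- scan case
        have hclean' : ∀ t ∈ ts.take (i+1), PySem.Str.isIn "//" t = false := by
          intro t ht
          rw [List.take_add_one] at ht
          simp only [List.getElem?_eq_getElem h, Option.toList_some, List.mem_append,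
            List.mem_singleton] at ht
          rcases ht with h' | h'
          · exact hclean t h'
          · subst h'; simpa using htag
        rw [ihN ts (i+1) (by omega) hclean']
        rw [hdrop]
        simp only [List.map_cons]
        rw [show pySplitDD ts[i] = [ts[i]] from pySplitDD_of_not_contains (by simpa using htag)]
        simp only [prodB, List.flatMap_cons, List.flatMap_nil, List.append_nil, List.map_map]
        apply List.map_congr_left
        intro c _
        rw [← List.take_concat_get h, List.concat_eq_append, List.append_assoc,
          List.singleton_append]
        rfl
    · rw [dif_neg h]
      have hi : ts.length ≤ i := by omega
      rw [List.drop_of_length_le hi, List.take_of_length_le hi]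
      simp [prodB]

-- ===== VERDICT (by name: the statement is the Claim_ definition above) =====
theorem split_multipart_tag_set_spec : Claim_equal_split_multipart_tag_set := by
  intro ts _
  unfold Spec_split_multipart_tag_set split_multipart_tag_set
  rw [alt_eq_prodB,
    go_eq (ddCount ts * (ts.length + 1) + ts.length) ts 0 (by omega) (by simp)]
  simp
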